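-- pv_equiv track=rewrite | github.com/JohnDunbar21/CodeAcademy | Learn_Python_3/Challenges_2/dictionaries_advanced/challenge_4.py | count_first_letter
-- ===== SOURCE A (Python) =====
-- def count_first_letter(names):
--     letters = {}
--     for key in names:
--         first_char = key[0]
--         if first_char not in letters:
--             letters[first_char] = 0
--         letters[first_char] += len(names[key])
--     return letters
-- ===== SOURCE B (Python) =====
-- def count_first_letter(names):
--     firsts = [key[0] for key in names]
--     return {c: sum(len(v) for k, v in names.items() if k[0] == c)
--             for c in dict.fromkeys(firsts)}
-- ===== Notes on version B (the rewrite author's own statement) =====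
-- stated objective: alternative
-- what changed: B replaces A's single streaming loop with a mutated counter dict by a two-phase grouped aggregation: it collects the first letters, deduplicates them in first-occurrence order, and builds the result with one length-sum comprehension per distinct letter.
import Mathlib
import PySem

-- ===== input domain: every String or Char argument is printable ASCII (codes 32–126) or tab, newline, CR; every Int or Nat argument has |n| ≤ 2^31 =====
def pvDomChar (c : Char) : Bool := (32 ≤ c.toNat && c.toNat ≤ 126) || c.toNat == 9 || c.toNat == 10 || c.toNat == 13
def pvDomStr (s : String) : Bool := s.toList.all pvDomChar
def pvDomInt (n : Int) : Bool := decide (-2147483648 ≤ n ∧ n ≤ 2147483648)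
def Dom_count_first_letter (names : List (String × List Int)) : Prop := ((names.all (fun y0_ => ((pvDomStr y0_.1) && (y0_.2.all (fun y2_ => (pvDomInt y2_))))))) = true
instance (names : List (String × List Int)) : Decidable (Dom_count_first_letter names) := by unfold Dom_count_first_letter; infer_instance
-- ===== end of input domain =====

-- B re-groups per distinct first letter (dedup of firsts, then one sum per letter) instead of A's
-- streaming dict accumulation; objective: alternative decomposition, same results.

-- ===== PORT A =====
def count_first_letter (names : List (String × List Int)) : List (String × Int) :=
  (names.foldl
    (fun (letters : PySem.Dict String Int) kv =>
      match PySem.Str.pyGet? kv.1 0 with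
      | none => letters   -- key[0] raises IndexError on a length-0 key; excluded by Pre_
      | some ch =>
        let fc := String.ofList [ch]
        let letters' := if letters.contains fc then letters else letters.insert fc 0
        letters'.insert fc (letters'.getD fc 0 +
          ((((PySem.Dict.mk names).get? kv.1).getD []).length : Int)))
    PySem.Dict.empty).items

-- ===== PORT B =====
def count_first_letter_alt (names : List (String × List Int)) : List (String × Int) :=
  -- firsts = [key[0] for key in names] (key[0] raises on a length-0 key, excluded by Pre_)
  let firsts := names.filterMap (fun kv => (PySem.Str.pyGet? kv.1 0).map (fun ch => String.ofList [ch]))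
  (PySem.List.dedup firsts).map (fun c =>
    (c, ((names.filter
            (fun kv => (PySem.Str.pyGet? kv.1 0).map (fun ch => String.ofList [ch]) == some c)).map
          (fun kv => (kv.2.length : Int))).sum))

-- ===== PRECONDITION & SPEC =====
-- Pre_ excludes keys of length 0, on which key[0] raises IndexError in both programs, and
-- association lists with duplicate keys, which do not represent any Python dict.
def Pre_count_first_letter (names : List (String × List Int)) : Prop :=
  (∀ kv ∈ names, kv.1 ≠ "") ∧ (names.map Prod.fst).Nodup
instance (names : List (String × List Int)) : Decidable (Pre_count_first_letter names) := by
  unfold Pre_count_first_letter; infer_instance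

def pvWitness_count_first_letter : (List (String × List Int)) :=
  [("ab", [1, 2]), ("ac", [3]), ("b", [])]

def Spec_count_first_letter (names : List (String × List Int)) (out : List (String × Int)) : Prop := out = count_first_letter_alt names
instance (names : List (String × List Int)) (out : List (String × Int)) : Decidable (Spec_count_first_letter names out) := by unfold Spec_count_first_letter; infer_instance

-- ===== CLAIM (what is proved, stated in full; the proofs are below) =====
def Claim_equal_count_first_letter : Prop := ∀ (names : List (String × List Int)), Dom_count_first_letter names → Pre_count_first_letter names → Spec_count_first_letter names (count_first_letter names)

-- ===== LEMMAS AND PROOFS =====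

-- first letter of a key (as a 1-character string), for keys known to be nonempty
def pvFc (kv : String × List Int) : String := String.ofList [kv.1.toList.headI]

-- the body of A's loop, with the first letter and the summand as parameters
def pvStep (d : PySem.Dict String Int) (c : String) (n : Int) : PySem.Dict String Int :=
  let d' := if d.contains c then d else d.insert c 0
  d'.insert c (d'.getD c 0 + n)

lemma pv_get_eq (kv : String × List Int) (h : kv.1 ≠ "") :
    PySem.Str.pyGet? kv.1 0 = some kv.1.toList.headI := by
  rcases hc : kv.1.toList with _ | ⟨c, t⟩
  · exact absurd (by simpa using congrArg String.ofList hc) h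
  · simp [hc]

lemma pv_lookup_eq (names : List (String × List Int)) (hnd : (names.map Prod.fst).Nodup)
    (kv : String × List Int) (hm : kv ∈ names) :
    (PySem.Dict.mk names).get? kv.1 = some kv.2 := by
  exact PySem.Dict.get?_of_mem_items (d := PySem.Dict.mk names) (k := kv.1) (v := kv.2)
    (by simpa using hm) (by simpa [PySem.Dict.keys] using hnd)

lemma pv_getD_step (d : PySem.Dict String Int) (c c' : String) (n : Int) :
    (pvStep d c n).getD c' 0 = if c' = c then d.getD c' 0 + n else d.getD c' 0 := by
  unfold pvStep
  by_cases hc : d.contains c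
  · simp [hc, PySem.Dict.getD_insert]
    split_ifs with h
    · subst h; rfl
    · rfl
  · simp [hc, PySem.Dict.getD_insert]
    split_ifs with h
    · subst h
      rw [PySem.Dict.getD_of_not_contains _ _ (by simpa using hc)]
      ring
    · rfl

lemma pv_keys_step (d : PySem.Dict String Int) (c : String) (n : Int) :
    (pvStep d c n).keys = PySem.Set.add d.keys c := by
  unfold pvStep
  by_cases hc : d.contains c
  · rw [if_pos hc, PySem.Dict.keys_insert_of_contains _ _ hc,
      PySem.Set.add_of_mem (by rwa [← PySem.Dict.contains_iff_mem_keys])]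
  · rw [if_neg hc]
    have h1 : (d.insert c 0).contains c := PySem.Dict.contains_insert_self _ _ _
    rw [PySem.Dict.keys_insert_of_contains _ _ h1,
      PySem.Dict.keys_insert_of_not_contains _ _ (by simpa using hc),
      PySem.Set.add_of_not_mem (by rw [← PySem.Dict.contains_iff_mem_keys]; simpa using hc)]

lemma pv_getD_foldl (l : List (String × List Int)) (key : (String × List Int) → String)
    (w : (String × List Int) → Int) (d : PySem.Dict String Int) (c : String) :
    (l.foldl (fun d kv => pvStep d (key kv) (w kv)) d).getD c 0
      = d.getD c 0 + ((l.filter (fun kv => key kv == c)).map w).sum := by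
  induction l generalizing d with
  | nil => simp
  | cons kv t ih =>
    rw [List.foldl_cons, ih, pv_getD_step]
    by_cases h : key kv = c
    · simp [h]; ring
    · have hb : (key kv == c) = false := by simpa using h
      have h2 : ¬ c = key kv := fun h2 => h h2.symm
      simp [hb, h2]

lemma pv_keys_foldl (l : List (String × List Int)) (key : (String × List Int) → String)
    (w : (String × List Int) → Int) (d : PySem.Dict String Int) :
    (l.foldl (fun d kv => pvStep d (key kv) (w kv)) d).keys
      = PySem.Set.update d.keys (l.map key) := by
  induction l generalizing d with
  | nil => simp [PySem.Set.update]
  | cons kv t ih =>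
    rw [List.foldl_cons, ih, pv_keys_step]
    simp [PySem.Set.update]

-- ===== VERDICT (by name: the statement is the Claim_ definition above) =====
theorem count_first_letter_spec : Claim_equal_count_first_letter := by
  intro names _ hpre
  obtain ⟨hne, hnd⟩ := hpre
  unfold Spec_count_first_letter count_first_letter count_first_letter_alt
  rw [PySem.List.foldl_congr_mem _ _ (fun d kv => pvStep d (pvFc kv) (kv.2.length : Int)) _
      (by
        intro acc kv hm
        rw [pv_get_eq kv (hne kv hm)]
        simp only []
        rw [pv_lookup_eq names hnd kv hm]
        simp [pvStep, pvFc])]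
  have hkeys : (names.foldl (fun d kv => pvStep d (pvFc kv) (kv.2.length : Int))
      PySem.Dict.empty).keys = PySem.Set.ofList (names.map pvFc) := by
    rw [pv_keys_foldl, PySem.Dict.keys_empty, PySem.Set.ofList_eq_foldl]
    simp [PySem.Set.update]
  have hfirsts : names.filterMap
      (fun kv => (PySem.Str.pyGet? kv.1 0).map (fun ch => String.ofList [ch]))
        = names.map pvFc := by
    rw [List.filterMap_congr (g := fun kv => some (pvFc kv))
      (by intro kv hm; rw [pv_get_eq kv (hne kv hm)]; simp [pvFc])]
    exact congrFun List.filterMap_eq_map names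
  rw [PySem.Dict.items_eq_map_keys _ (by rw [hkeys]; exact PySem.Set.nodup_ofList _) 0, hkeys]
  simp only [hfirsts, PySem.List.dedup_eq_ofList]
  apply List.map_congr_left
  intro c hc
  rw [pv_getD_foldl]
  simp only [PySem.Dict.getD_empty, zero_add]
  congr 1
  apply congrArg
  apply congrArg
  apply List.filter_congr
  intro kv hm
  rw [pv_get_eq kv (hne kv hm)]
  simp [pvFc]
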